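-- pv_equiv track=rewrite | github.com/FrunzyR/Matrici-pbinfo | 207/main.py | solve
-- ===== SOURCE A (Python) =====
-- def solve(n):
--     new_list = []
--     for i in range(n):
--         new_row = []
--         for j in range(n):
--             if i == j:
--                 new_row.append(0)
--             elif j == 0:
--                 new_row.append(n)
--             else:
--                 new_row.append(n-j)
--         new_list.append(new_row)
--     return new_list
-- ===== SOURCE B (Python) =====
-- def solve(n):
--     # Build the matrix column-by-column: column j is constant n-j except a 0
--     # on the diagonal, then transpose into row-major order.
--     cols = []
--     for j in range(n):
--         col = [n - j] * n
--         col[j] = 0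
--         cols.append(col)
--     return [[col[i] for col in cols] for i in range(n)]
-- ===== Notes on version B (the rewrite author's own statement) =====
-- stated objective: alternative
-- what changed: Builds the matrix column-major (each column is a constant n-j vector with the diagonal patched to 0) and then transposes into rows, instead of A's row-major per-cell rule with its redundant first-column branch.
import Mathlib
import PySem

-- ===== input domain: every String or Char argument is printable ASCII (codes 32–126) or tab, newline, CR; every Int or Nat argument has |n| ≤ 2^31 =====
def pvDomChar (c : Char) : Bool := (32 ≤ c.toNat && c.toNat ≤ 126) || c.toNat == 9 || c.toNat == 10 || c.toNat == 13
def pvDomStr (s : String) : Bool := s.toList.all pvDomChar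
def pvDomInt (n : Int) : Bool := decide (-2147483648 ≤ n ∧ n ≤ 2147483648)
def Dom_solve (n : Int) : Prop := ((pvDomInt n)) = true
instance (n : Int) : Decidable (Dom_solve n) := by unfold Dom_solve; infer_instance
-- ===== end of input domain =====

-- B builds the matrix column-major (column j is a constant n-j vector with the diagonal
-- patched to 0) and then transposes into rows, instead of A's row-major per-cell rule
-- with its redundant first-column branch (objective: alternative decomposition).

-- ===== PORT A =====
def solve (n : Int) : List (List Int) :=
  (PySem.List.pyRange 0 n 1).foldl (fun new_list i =>
    new_list ++ [(PySem.List.pyRange 0 n 1).foldl (fun new_row j =>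
      new_row ++ [if i = j then 0 else if j = 0 then n else n - j]) []]) []

-- ===== PORT B =====
def solve_alt (n : Int) : List (List Int) :=
  let cols := (PySem.List.pyRange 0 n 1).foldl (fun cols j =>
    cols ++ [(List.replicate n.toNat (n - j)).set j.toNat 0]) []
  (PySem.List.pyRange 0 n 1).map (fun i => cols.map (fun col => PySem.List.pyGetD col i 0))

-- ===== PRECONDITION & SPEC =====
def Spec_solve (n : Int) (out : List (List Int)) : Prop := out = solve_alt n
instance (n : Int) (out : List (List Int)) : Decidable (Spec_solve n out) := by unfold Spec_solve; infer_instance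

-- ===== CLAIM (what is proved, stated in full; the proofs are below) =====
def Claim_equal_solve : Prop := ∀ (n : Int), Dom_solve n → Spec_solve n (solve n)

-- ===== LEMMAS AND PROOFS =====

theorem foldl_app_singleton {α β : Type} (f : α → β) (l : List α) (acc : List β) :
    l.foldl (fun a i => a ++ [f i]) acc = acc ++ l.map f := by
  induction l generalizing acc with
  | nil => simp
  | cons x xs ih => simp [List.foldl, ih]

theorem cell_eq (n i j : Int) (hi : 0 ≤ i) (hin : i < n) (hj : 0 ≤ j) (hjn : j < n) :
    PySem.List.pyGetD ((List.replicate n.toNat (n - j)).set j.toNat 0) i 0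
      = (if i = j then 0 else if j = 0 then n else n - j) := by
  rw [PySem.List.pyGetD_eq_getElem _ 0 hi (by simp; omega)]
  rw [List.getElem_set]
  split_ifs <;> (try simp only [List.getElem_replicate]) <;> omega

theorem solve_spec_aux (n : Int) : solve n = solve_alt n := by
  unfold solve solve_alt
  rw [foldl_app_singleton, foldl_app_singleton]
  simp only [List.nil_append, List.map_map]
  apply List.map_congr_left
  intro i hi
  rw [PySem.List.mem_pyRange_one] at hi
  rw [foldl_app_singleton]
  simp only [List.nil_append, Function.comp_def]
  apply List.map_congr_left
  intro j hj
  rw [PySem.List.mem_pyRange_one] at hj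
  exact (cell_eq n i j hi.1 hi.2 hj.1 hj.2).symm

-- ===== VERDICT (by name: the statement is the Claim_ definition above) =====
theorem solve_spec : Claim_equal_solve := by
  intro n _
  exact solve_spec_aux n
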